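-- pv_equiv track=rewrite | github.com/or-m-or/KT-AIVLE-School-5th_Codingmasters | example/round2/Intermediate/Q8702_이웃/A8702_solve.py | adjust_weights
-- ===== SOURCE A (Python) =====
-- from collections import defaultdict, deque
--
-- def adjust_weights(graph, weights, K):
--     # 각 정점에 대한 최소 비용을 저장할 배열 초기화
--     min_cost = [0] * len(weights)
--
--     # 모든 정점에 대해 반복
--     for start_v in range(1, len(weights)):
--         # 해당 정점에서 시작하는 BFS 실행
--         queue = deque()
--         queue.append(start_v)
--         visited = [False] * len(weights)
--         visited[start_v] = True
--
--         while queue: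
--             cur_v = queue.popleft()
--
--             for next_v in graph[cur_v]:
--                 if not visited[next_v]:
--                     visited[next_v] = True
--                     queue.append(next_v)
--                     # 현재 정점과 다음 정점 간의 가중치 차이 계산
--                     weight_diff = abs(weights[cur_v] - weights[next_v])
--                     # 가중치 차이가 K 이하로 만들기 위해 필요한 비용 계산
--                     if weight_diff > K:
--                         additional_cost = weight_diff - K
--                         # 다음 정점의 가중치를 현재 정점의 가중치 + K 또는 -K로 조정
--                         if weights[cur_v] > weights[next_v]:
--                             min_cost[next_v] += additional_cost
--                             weights[next_v] += additional_cost
--                         else: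
--                             min_cost[cur_v] += additional_cost
--                             weights[cur_v] += additional_cost
--     return sum(min_cost)
-- ===== SOURCE B (Python) =====
-- def adjust_weights(graph, weights, K):
--     # Phase 1: collect every discovered tree edge, in discovery order, across
--     # all starts.  BFS order depends only on the graph, never on the weights,
--     # so the whole edge sequence can be computed up front (pointer-scan BFS
--     # over a visited set instead of a deque plus a visited array).
--     edges = []
--     for start in range(1, len(weights)):
--         seen = {start}
--         order = [start]
--         i = 0
--         while i < len(order):
--             v = order[i]
--             i += 1
--             for u in graph[v]:
--                 if u not in seen:
--                     seen.add(u)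
--                     order.append(u)
--                     edges.append((v, u))
--     # Phase 2: one pass over the edge sequence applying the K-threshold
--     # adjustment, accumulating the total cost in a scalar (mutates weights
--     # in place).
--     total = 0
--     for v, u in edges:
--         diff = abs(weights[v] - weights[u])
--         if diff > K:
--             extra = diff - K
--             if weights[v] > weights[u]:
--                 weights[u] += extra
--             else:
--                 weights[v] += extra
--             total += extra
--     return total
-- ===== Notes on version B (the rewrite author's own statement) =====
-- stated objective: alternative
-- what changed: B splits the work into a weight-free phase that records the whole BFS-forest edge sequence (a pointer-scan over a growing order list with a visited set, across all starts) and a single scalar-accumulator pass that then applies the K-threshold adjustments, instead of A's per-start deque BFS that interleaves cost updates into a per-vertex cost array summed at the end; …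
-- outside the precondition, e.g. on adjust_weights({0: [], 1: [-1]}, [5, 7], 0): A returns 0, B raises KeyError
import Mathlib
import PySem

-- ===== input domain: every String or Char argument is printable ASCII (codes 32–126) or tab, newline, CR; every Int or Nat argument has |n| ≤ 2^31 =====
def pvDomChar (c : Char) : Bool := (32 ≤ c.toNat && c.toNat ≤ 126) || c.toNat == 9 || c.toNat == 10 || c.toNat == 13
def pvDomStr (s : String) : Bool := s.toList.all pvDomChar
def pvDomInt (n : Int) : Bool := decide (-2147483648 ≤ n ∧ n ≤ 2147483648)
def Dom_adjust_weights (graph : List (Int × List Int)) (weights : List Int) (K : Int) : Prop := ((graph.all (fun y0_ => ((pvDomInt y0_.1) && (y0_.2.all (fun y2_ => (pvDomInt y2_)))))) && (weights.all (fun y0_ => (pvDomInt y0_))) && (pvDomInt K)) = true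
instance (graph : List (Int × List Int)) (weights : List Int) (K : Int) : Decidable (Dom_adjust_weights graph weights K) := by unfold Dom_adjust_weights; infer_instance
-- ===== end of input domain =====

-- B is an alternative decomposition (same asymptotic cost): a weight-free phase records the
-- whole BFS-forest edge sequence (pointer-scan over a growing list with a visited set), then a
-- single scalar-accumulator pass applies the K-threshold adjustments; A interleaves cost updates
-- into a per-vertex cost array inside per-start deque BFS.  Both Pythons mutate `weights` in
-- place identically on Pre_; the equivalence proved here is about the RETURN value.

-- ===== PORT A =====

-- helper lemmas the ports' termination proofs cite
theorem pv_count_false_set : ∀ (l : List Bool) (k : Nat), k < l.length → l.getD k true = false →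
    (l.set k true).count false + 1 = l.count false := by
  intro l
  induction l with
  | nil => intro k hk _; simp at hk
  | cons b t ih =>
    intro k hk hb
    cases k with
    | zero => simp at hb; subst hb; simp [List.count_cons]
    | succ k =>
      simp only [List.set_cons_succ, List.count_cons]
      have := ih k (by simpa using hk) (by simpa using hb)
      omega

theorem pv_get_set_false (vis : List Bool) (u : Int)
    (h : PySem.List.pyGet? vis u = some false) :
    (PySem.List.pySetD vis u true).count false + 1 = vis.count false := by
  unfold PySem.List.pyGet? at h
  cases hidx : PySem.List.pyIdx? vis.length u with
  | none => rw [hidx] at h; simp at h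
  | some k =>
    rw [hidx] at h
    simp only [Option.bind_some] at h
    have hk : k < vis.length := by
      by_contra hk
      rw [List.getElem?_eq_none (by omega)] at h
      simp at h
    have hfalse : vis.getD k true = false := by
      rw [List.getD_eq_getElem _ _ hk]
      have := List.getElem?_eq_getElem (l := vis) (i := k) hk
      rw [this] at h
      simpa using h
    have hset : PySem.List.pySetD vis u true = vis.set k true := by
      unfold PySem.List.pySetD PySem.List.pySet?
      rw [hidx]; rfl
    rw [hset]
    exact pv_count_false_set vis k hk hfalse

def pvA_cost (K cur next : Int) (st : List Int × List Int) : List Int × List Int :=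
  let wd := |PySem.List.pyGetD st.1 cur 0 - PySem.List.pyGetD st.1 next 0|
  if K < wd then
    let add := wd - K
    if PySem.List.pyGetD st.1 next 0 < PySem.List.pyGetD st.1 cur 0 then
      (PySem.List.pySetD st.1 next (PySem.List.pyGetD st.1 next 0 + add),
       PySem.List.pySetD st.2 next (PySem.List.pyGetD st.2 next 0 + add))
    else
      (PySem.List.pySetD st.1 cur (PySem.List.pyGetD st.1 cur 0 + add),
       PySem.List.pySetD st.2 cur (PySem.List.pyGetD st.2 cur 0 + add))
  else st

def pvA_inner (K cur : Int) (ns : List Int)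
    (s : List Bool × List Int × List Int × List Int) :
    List Bool × List Int × List Int × List Int :=
  ns.foldl (fun s next =>
    if PySem.List.pyGet? s.1 next = some false then
      (PySem.List.pySetD s.1 next true, s.2.1 ++ [next], pvA_cost K cur next s.2.2)
    else s) s

theorem pvA_inner_measure (K cur : Int) (ns : List Int)
    (s : List Bool × List Int × List Int × List Int) :
    (pvA_inner K cur ns s).1.count false + (pvA_inner K cur ns s).2.1.length ≤
      s.1.count false + s.2.1.length := by
  induction ns generalizing s with
  | nil => simp [pvA_inner]
  | cons u ns ih =>
    unfold pvA_inner at ih ⊢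
    rw [List.foldl_cons]
    by_cases h : PySem.List.pyGet? s.1 u = some false
    · rw [if_pos h]
      have h1 : (List.foldl _ (PySem.List.pySetD s.1 u true, s.2.1 ++ [u],
            pvA_cost K cur u s.2.2) ns).1.count false +
          (List.foldl _ (PySem.List.pySetD s.1 u true, s.2.1 ++ [u],
            pvA_cost K cur u s.2.2) ns).2.1.length ≤
          (PySem.List.pySetD s.1 u true).count false + (s.2.1 ++ [u]).length :=
        ih (PySem.List.pySetD s.1 u true, s.2.1 ++ [u], pvA_cost K cur u s.2.2)
      have h2 := pv_get_set_false s.1 u h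
      simp only [List.length_append, List.length_cons, List.length_nil] at h1 ⊢
      omega
    · rw [if_neg h]
      exact ih s

def pvA_bfs (g : PySem.Dict Int (List Int)) (K : Int) :
    List Bool → List Int → List Int × List Int → List Int × List Int
  | _, [], st => st
  | vis, cur :: q, st =>
      let r := pvA_inner K cur (g.getD cur []) (vis, q, st)
      pvA_bfs g K r.1 r.2.1 r.2.2
  termination_by vis q _ => vis.count false + q.length
  decreasing_by
    have h2 : (pvA_inner K cur (g.getD cur []) (vis, q, st)).1.count false +
        (pvA_inner K cur (g.getD cur []) (vis, q, st)).2.1.length ≤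
        vis.count false + q.length := pvA_inner_measure K cur (g.getD cur []) (vis, q, st)
    simp only [List.length_cons]
    omega

def adjust_weights (graph : List (Int × List Int)) (weights : List Int) (K : Int) : Int :=
  let g := PySem.Dict.ofList graph
  let n := weights.length
  ((PySem.List.pyRange 1 (n : Int) 1).foldl
    (fun st start =>
      pvA_bfs g K (PySem.List.pySetD (List.replicate n false) start true) [start] st)
    (weights, List.replicate n (0 : Int))).2.sum

-- ===== PORT B =====

def pvB_inner (v : Int) (ns : List Int)
    (s : PySem.Set Int × List Int × List (Int × Int)) :
    PySem.Set Int × List Int × List (Int × Int) :=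
  ns.foldl (fun s u =>
    if PySem.Set.contains s.1 u = false then
      (PySem.Set.add s.1 u, s.2.1 ++ [u], s.2.2 ++ [(v, u)])
    else s) s

-- termination potential for the pointer-scan BFS: marks that can still be added
def pvB_pot (g : PySem.Dict Int (List Int)) (seen : PySem.Set Int) : Nat :=
  ((PySem.List.dedup g.values.flatten).filter
    (fun m => PySem.Set.contains seen m = false)).length

theorem pv_ns_sub_values (g : PySem.Dict Int (List Int)) (v : Int) :
    ∀ u ∈ g.getD v [], u ∈ g.values.flatten := by
  intro u hu
  unfold PySem.Dict.getD at hu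
  cases hget : g.get? v with
  | none => rw [hget] at hu; simp at hu
  | some ns =>
    rw [hget] at hu
    simp only [Option.getD_some] at hu
    have hitems := PySem.Dict.mem_items_of_get?_eq_some g hget
    exact List.mem_flatten.mpr ⟨ns, List.mem_map.mpr ⟨(v, ns), hitems, rfl⟩, hu⟩

theorem pv_contains_false_iff (s : PySem.Set Int) (x : Int) :
    PySem.Set.contains s x = false ↔ x ∉ s := by
  simp [PySem.Set.contains]

theorem pv_pot_add (P : List Int) (seen : PySem.Set Int) (m : Int) (hm : m ∈ P)
    (hnot : PySem.Set.contains seen m = false) :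
    (P.filter (fun x => PySem.Set.contains (PySem.Set.add seen m) x = false)).length + 1 ≤
      (P.filter (fun x => PySem.Set.contains seen x = false)).length := by
  have hpoint : ∀ a : Int, (decide (PySem.Set.contains (PySem.Set.add seen m) a = false)) = true →
      (decide (PySem.Set.contains seen a = false)) = true := by
    intro a ha
    simp only [decide_eq_true_eq, pv_contains_false_iff] at ha ⊢
    intro hmem
    exact ha ((PySem.Set.mem_add seen m a).mpr (Or.inl hmem))
  have hsub := List.monotone_filter_right P
    (p := fun x => decide (PySem.Set.contains (PySem.Set.add seen m) x = false))
    (q := fun x => decide (PySem.Set.contains seen x = false)) hpoint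
  have hmemr : m ∈ P.filter (fun x => PySem.Set.contains seen x = false) :=
    List.mem_filter.mpr ⟨hm, by simp only [decide_eq_true_eq]; exact hnot⟩
  have hmeml : m ∉ P.filter (fun x => PySem.Set.contains (PySem.Set.add seen m) x = false) := by
    intro hc
    have h2 := (List.mem_filter.mp hc).2
    simp only [decide_eq_true_eq, pv_contains_false_iff] at h2
    exact h2 ((PySem.Set.mem_add seen m m).mpr (Or.inr rfl))
  have hle := hsub.length_le
  rcases lt_or_eq_of_le hle with h | h
  · omega
  · exact absurd (hsub.eq_of_length h ▸ hmemr) hmeml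

theorem pvB_inner_measure (g : PySem.Dict Int (List Int)) (v : Int) (ns : List Int)
    (hns : ∀ u ∈ ns, u ∈ g.values.flatten)
    (s : PySem.Set Int × List Int × List (Int × Int)) :
    pvB_pot g (pvB_inner v ns s).1 + (pvB_inner v ns s).2.1.length ≤
        pvB_pot g s.1 + s.2.1.length ∧
      s.2.1.length ≤ (pvB_inner v ns s).2.1.length := by
  induction ns generalizing s with
  | nil => simp [pvB_inner]
  | cons u ns ih =>
    have hu : u ∈ g.values.flatten := hns u (by simp)
    have hns' : ∀ x ∈ ns, x ∈ g.values.flatten := fun x hx => hns x (by simp [hx])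
    unfold pvB_inner at ih ⊢
    rw [List.foldl_cons]
    by_cases h : PySem.Set.contains s.1 u = false
    · rw [if_pos h]
      have h1 : pvB_pot g (List.foldl _ (PySem.Set.add s.1 u,
            s.2.1 ++ [u], s.2.2 ++ [(v, u)]) ns).1 +
          (List.foldl _ (PySem.Set.add s.1 u,
            s.2.1 ++ [u], s.2.2 ++ [(v, u)]) ns).2.1.length ≤
            pvB_pot g (PySem.Set.add s.1 u) + (s.2.1 ++ [u]).length ∧
          (s.2.1 ++ [u]).length ≤ (List.foldl _ (PySem.Set.add s.1 u,
            s.2.1 ++ [u], s.2.2 ++ [(v, u)]) ns).2.1.length :=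
        ih hns' (PySem.Set.add s.1 u, s.2.1 ++ [u], s.2.2 ++ [(v, u)])
      have h2 := pv_pot_add (PySem.List.dedup g.values.flatten) s.1 u
        ((PySem.List.mem_dedup _ _).mpr hu) h
      unfold pvB_pot at h1 h2 ⊢
      simp only [List.length_append, List.length_cons, List.length_nil] at h1 ⊢
      omega
    · rw [if_neg h]
      exact ih hns' s

def pvB_bfs (g : PySem.Dict Int (List Int))
    (seen : PySem.Set Int) (order : List Int) (i : Nat) (edges : List (Int × Int)) :
    List (Int × Int) :=
  if h : i < order.length then
    let r := pvB_inner (order[i]) (g.getD (order[i]) []) (seen, order, edges)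
    pvB_bfs g r.1 r.2.1 (i + 1) r.2.2
  else edges
  termination_by pvB_pot g seen + (order.length - i)
  decreasing_by
    have h2 : pvB_pot g (pvB_inner (order[i]) (g.getD (order[i]) []) (seen, order, edges)).1 +
          (pvB_inner (order[i]) (g.getD (order[i]) []) (seen, order, edges)).2.1.length ≤
          pvB_pot g seen + order.length ∧
        order.length ≤ (pvB_inner (order[i]) (g.getD (order[i]) []) (seen, order, edges)).2.1.length :=
      pvB_inner_measure g (order[i]) (g.getD (order[i]) [])
        (pv_ns_sub_values g (order[i])) (seen, order, edges)
    omega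

def pvB_cost (K : Int) (st : List Int × Int) (e : Int × Int) : List Int × Int :=
  let wv := PySem.List.pyGetD st.1 e.1 0
  let wu := PySem.List.pyGetD st.1 e.2 0
  let d := |wv - wu|
  if K < d then
    let extra := d - K
    (if wu < wv then PySem.List.pySetD st.1 e.2 (wu + extra)
     else PySem.List.pySetD st.1 e.1 (wv + extra), st.2 + extra)
  else st

def adjust_weights_alt (graph : List (Int × List Int)) (weights : List Int) (K : Int) : Int :=
  let g := PySem.Dict.ofList graph
  let edges := (PySem.List.pyRange 1 (weights.length : Int) 1).foldl
    (fun es start => pvB_bfs g (PySem.Set.ofList [start]) [start] 0 es) []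
  (edges.foldl (pvB_cost K) (weights, 0)).2

-- ===== PRECONDITION & SPEC =====
-- Pre_ excludes the inputs on which A raises (a reached vertex missing from the dict, KeyError;
-- an examined neighbour index outside [-n, n), IndexError) and restricts the graph to the natural
-- domain where vertex ids are list positions: every neighbour id in [0, n) and present as a key;
-- on graphs with negative neighbour ids A's visited/weights accesses rely on Python's
-- negative-index wraparound, and being closed-form, Pre_ checks every dict entry, so it also
-- drops some graphs whose malformed entries are unreachable and on which A returns (see cites).
def Pre_adjust_weights (graph : List (Int × List Int)) (weights : List Int) (K : Int) : Prop :=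
  weights.length ≤ 1 ∨
  ((∀ v ∈ PySem.List.pyRange 1 (weights.length : Int) 1,
      (PySem.Dict.ofList graph).contains v = true) ∧
  (∀ p ∈ graph, ∀ u ∈ p.2,
      0 ≤ u ∧ u < (weights.length : Int) ∧
      (PySem.Dict.ofList graph).contains u = true))
instance (graph : List (Int × List Int)) (weights : List Int) (K : Int) :
    Decidable (Pre_adjust_weights graph weights K) := by unfold Pre_adjust_weights; infer_instance

def pvWitness_adjust_weights : (List (Int × List Int)) × List Int × Int :=
  ([(0, []), (1, [0, 2]), (2, [1])], [0, 5, 9], 1)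

def Spec_adjust_weights (graph : List (Int × List Int)) (weights : List Int) (K : Int) (out : Int) : Prop := out = adjust_weights_alt graph weights K
instance (graph : List (Int × List Int)) (weights : List Int) (K : Int) (out : Int) : Decidable (Spec_adjust_weights graph weights K out) := by unfold Spec_adjust_weights; infer_instance

-- ===== CLAIM (what is proved, stated in full; the proofs are below) =====
def Claim_equal_adjust_weights : Prop := ∀ (graph : List (Int × List Int)) (weights : List Int) (K : Int), Dom_adjust_weights graph weights K → Pre_adjust_weights graph weights K → Spec_adjust_weights graph weights K (adjust_weights graph weights K)

-- ===== LEMMAS AND PROOFS =====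

-- ---- shadow (weight-free) edge collector mirroring A's BFS ----

def qEInner (cur : Int) (ns : List Int)
    (s : List Bool × List Int × List (Int × Int)) :
    List Bool × List Int × List (Int × Int) :=
  ns.foldl (fun s next =>
    if PySem.List.pyGet? s.1 next = some false then
      (PySem.List.pySetD s.1 next true, s.2.1 ++ [next], s.2.2 ++ [(cur, next)])
    else s) s

theorem qEInner_measure (cur : Int) (ns : List Int)
    (s : List Bool × List Int × List (Int × Int)) :
    (qEInner cur ns s).1.count false + (qEInner cur ns s).2.1.length ≤
      s.1.count false + s.2.1.length := by
  induction ns generalizing s with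
  | nil => simp [qEInner]
  | cons u ns ih =>
    unfold qEInner at ih ⊢
    rw [List.foldl_cons]
    by_cases h : PySem.List.pyGet? s.1 u = some false
    · rw [if_pos h]
      have h1 : (List.foldl _ (PySem.List.pySetD s.1 u true, s.2.1 ++ [u],
            s.2.2 ++ [(cur, u)]) ns).1.count false +
          (List.foldl _ (PySem.List.pySetD s.1 u true, s.2.1 ++ [u],
            s.2.2 ++ [(cur, u)]) ns).2.1.length ≤
          (PySem.List.pySetD s.1 u true).count false + (s.2.1 ++ [u]).length :=
        ih (PySem.List.pySetD s.1 u true, s.2.1 ++ [u], s.2.2 ++ [(cur, u)])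
      have h2 := pv_get_set_false s.1 u h
      simp only [List.length_append, List.length_cons, List.length_nil] at h1 ⊢
      omega
    · rw [if_neg h]
      exact ih s

def qE (g : PySem.Dict Int (List Int)) :
    List Bool → List Int → List (Int × Int) → List (Int × Int)
  | _, [], es => es
  | vis, cur :: q, es =>
      let r := qEInner cur (g.getD cur []) (vis, q, es)
      qE g r.1 r.2.1 r.2.2
  termination_by vis q _ => vis.count false + q.length
  decreasing_by
    have h2 : (qEInner cur (g.getD cur []) (vis, q, es)).1.count false +
        (qEInner cur (g.getD cur []) (vis, q, es)).2.1.length ≤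
        vis.count false + q.length := qEInner_measure cur (g.getD cur []) (vis, q, es)
    simp only [List.length_cons]
    omega

theorem qEInner_append (cur : Int) (ns : List Int) : ∀ (vis : List Bool) (q : List Int)
    (es : List (Int × Int)),
    qEInner cur ns (vis, q, es) =
      ((qEInner cur ns (vis, q, [])).1, (qEInner cur ns (vis, q, [])).2.1,
        es ++ (qEInner cur ns (vis, q, [])).2.2) := by
  induction ns with
  | nil => intro vis q es; simp [qEInner]
  | cons u ns ih =>
    intro vis q es
    unfold qEInner
    rw [List.foldl_cons, List.foldl_cons]
    by_cases h : PySem.List.pyGet? vis u = some false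
    · simp only [h, if_pos]
      have hA := ih (PySem.List.pySetD vis u true) (q ++ [u]) (es ++ [(cur, u)])
      have hB := ih (PySem.List.pySetD vis u true) (q ++ [u]) ([] ++ [(cur, u)])
      unfold qEInner at hA hB
      rw [hA, hB]
      simp
    · simp only [h, if_false]
      exact ih vis q es

theorem qE_append' (g : PySem.Dict Int (List Int)) :
    ∀ (vis : List Bool) (q : List Int) (es es₀ : List (Int × Int)),
      qE g vis q (es₀ ++ es) = es₀ ++ qE g vis q es := by
  intro vis q es
  induction vis, q, es using qE.induct g with
  | case1 vis es => intro es₀; rw [qE, qE]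
  | case2 vis cur q es r ih =>
    intro es₀
    rw [qE, qE]
    have ih2 : ∀ es₁ : List (Int × Int),
        qE g (qEInner cur (g.getD cur []) (vis, q, es)).1
          (qEInner cur (g.getD cur []) (vis, q, es)).2.1
          (es₁ ++ (qEInner cur (g.getD cur []) (vis, q, es)).2.2) =
        es₁ ++ qE g (qEInner cur (g.getD cur []) (vis, q, es)).1
          (qEInner cur (g.getD cur []) (vis, q, es)).2.1
          (qEInner cur (g.getD cur []) (vis, q, es)).2.2 := ih
    rw [qEInner_append cur (g.getD cur []) vis q es] at ih2
    rw [qEInner_append cur (g.getD cur []) vis q (es₀ ++ es),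
        qEInner_append cur (g.getD cur []) vis q es]
    simp only [List.append_assoc] at ih2 ⊢
    simpa using ih2 es₀

theorem qE_append (g : PySem.Dict Int (List Int)) (vis : List Bool) (q : List Int)
    (es : List (Int × Int)) :
    qE g vis q es = es ++ qE g vis q [] := by
  have := qE_append' g vis q [] es
  simpa using this

-- ---- A's BFS = cost fold over the shadow edge stream ----

def applyA (K : Int) (es : List (Int × Int)) (st : List Int × List Int) :
    List Int × List Int :=
  es.foldl (fun st e => pvA_cost K e.1 e.2 st) st

theorem pvA_inner_eq (K cur : Int) (ns : List Int) : ∀ (vis : List Bool) (q : List Int)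
    (st : List Int × List Int),
    pvA_inner K cur ns (vis, q, st) =
      ((qEInner cur ns (vis, q, [])).1, (qEInner cur ns (vis, q, [])).2.1,
        applyA K (qEInner cur ns (vis, q, [])).2.2 st) := by
  induction ns with
  | nil => intro vis q st; simp [pvA_inner, qEInner, applyA]
  | cons u ns ih =>
    intro vis q st
    unfold pvA_inner qEInner
    rw [List.foldl_cons, List.foldl_cons]
    by_cases h : PySem.List.pyGet? vis u = some false
    · simp only [h, if_pos]
      have hA := ih (PySem.List.pySetD vis u true) (q ++ [u]) (pvA_cost K cur u st)
      have hB := qEInner_append cur ns (PySem.List.pySetD vis u true) (q ++ [u]) ([] ++ [(cur, u)])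
      unfold pvA_inner qEInner at hA hB
      rw [hA, hB]
      simp [applyA]
    · simp only [h, if_false]
      exact ih vis q st

theorem pvA_bfs_eq (g : PySem.Dict Int (List Int)) (K : Int) : ∀ (vis : List Bool)
    (q : List Int) (st : List Int × List Int),
    pvA_bfs g K vis q st = applyA K (qE g vis q []) st := by
  intro vis q st
  induction vis, q, st using pvA_bfs.induct g K with
  | case1 vis st => rw [pvA_bfs, qE]; simp [applyA]
  | case2 vis cur q st r ih =>
    rw [pvA_bfs, qE]
    have ih2 : pvA_bfs g K (pvA_inner K cur (g.getD cur []) (vis, q, st)).1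
        (pvA_inner K cur (g.getD cur []) (vis, q, st)).2.1
        (pvA_inner K cur (g.getD cur []) (vis, q, st)).2.2 =
        applyA K (qE g (pvA_inner K cur (g.getD cur []) (vis, q, st)).1
          (pvA_inner K cur (g.getD cur []) (vis, q, st)).2.1 [])
          (pvA_inner K cur (g.getD cur []) (vis, q, st)).2.2 := ih
    rw [pvA_inner_eq K cur (g.getD cur [])] at ih2 ⊢
    dsimp only at ih2 ⊢
    rw [ih2, qE_append g _ _ (qEInner cur (g.getD cur []) (vis, q, [])).2.2]
    simp [applyA, List.foldl_append]

-- ---- pointer-scan BFS = shadow queue BFS ----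

def pvR (n : Nat) (vis : List Bool) (seen : PySem.Set Int) : Prop :=
  vis.length = n ∧ ∀ j : Nat, j < n → vis.getD j false = decide ((j : Int) ∈ seen)

def pvHnb (g : PySem.Dict Int (List Int)) (n : Nat) : Prop :=
  ∀ v : Int, ∀ u ∈ g.getD v [], 0 ≤ u ∧ u < (n : Int)

theorem pv_pyIdx_nonneg (n : Nat) (i : Int) (h1 : 0 ≤ i) (h2 : i < (n : Int)) :
    PySem.List.pyIdx? n i = some i.toNat := by
  unfold PySem.List.pyIdx?
  rw [if_pos h1, if_pos h2]

theorem pv_pyGet_nonneg {α : Type} (xs : List α) (i : Int) (h1 : 0 ≤ i)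
    (h2 : i < (xs.length : Int)) :
    PySem.List.pyGet? xs i = xs[i.toNat]? := by
  unfold PySem.List.pyGet?
  rw [pv_pyIdx_nonneg xs.length i h1 h2]
  rfl

theorem pv_pySetD_nonneg {α : Type} (xs : List α) (i : Int) (v : α) (h1 : 0 ≤ i)
    (h2 : i < (xs.length : Int)) :
    PySem.List.pySetD xs i v = xs.set i.toNat v := by
  unfold PySem.List.pySetD PySem.List.pySet?
  rw [pv_pyIdx_nonneg xs.length i h1 h2]
  rfl

theorem pv_pyGetD_nonneg {α : Type} (xs : List α) (i : Int) (d : α) (h1 : 0 ≤ i)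
    (h2 : i < (xs.length : Int)) :
    PySem.List.pyGetD xs i d = xs.getD i.toNat d := by
  have hlt : i.toNat < xs.length := by omega
  show (PySem.List.pyGet? xs i).getD d = _
  rw [pv_pyGet_nonneg xs i h1 h2, List.getElem?_eq_getElem hlt,
    List.getD_eq_getElem _ _ hlt]
  rfl

theorem pv_guard_equiv (n : Nat) (vis : List Bool) (seen : PySem.Set Int)
    (hR : pvR n vis seen) (u : Int) (h1 : 0 ≤ u) (h2 : u < (n : Int)) :
    (PySem.List.pyGet? vis u = some false) ↔
      PySem.Set.contains seen u = false := by
  obtain ⟨hlen, hget⟩ := hR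
  have htn : ((u.toNat : Nat) : Int) = u := Int.toNat_of_nonneg h1
  have hlt : u.toNat < n := by omega
  have hlt' : u.toNat < vis.length := by omega
  have hnorm : PySem.List.pyGet? vis u = vis[u.toNat]? :=
    pv_pyGet_nonneg vis u h1 (by omega)
  rw [hnorm, List.getElem?_eq_getElem hlt',
    ← List.getD_eq_getElem vis false hlt', hget _ hlt, htn]
  constructor
  · intro h
    rw [pv_contains_false_iff]
    intro hmem
    simp [hmem] at h
  · intro h
    rw [pv_contains_false_iff] at h
    simp [h]

theorem pvR_preserve (n : Nat) (vis : List Bool) (seen : PySem.Set Int)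
    (hR : pvR n vis seen) (u : Int) (h1 : 0 ≤ u) (h2 : u < (n : Int)) :
    pvR n (PySem.List.pySetD vis u true) (PySem.Set.add seen u) := by
  obtain ⟨hlen, hget⟩ := hR
  have htn : ((u.toNat : Nat) : Int) = u := Int.toNat_of_nonneg h1
  have hlt : u.toNat < n := by omega
  have hset : PySem.List.pySetD vis u true = vis.set u.toNat true :=
    pv_pySetD_nonneg vis u true h1 (by omega)
  rw [hset]
  refine ⟨by simpa using hlen, ?_⟩
  intro j hj
  have hjlen : j < (vis.set u.toNat true).length := by
    simpa [hlen] using hj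
  rw [List.getD_eq_getElem _ false hjlen]
  by_cases hjm : j = u.toNat
  · subst hjm
    rw [List.getElem_set_self]
    have hmm : ((u.toNat : Nat) : Int) ∈ PySem.Set.add seen u := by
      rw [htn]
      exact (PySem.Set.mem_add _ _ _).mpr (Or.inr rfl)
    exact (decide_eq_true hmm).symm
  · rw [List.getElem_set_ne (fun hc => hjm hc.symm)]
    have hjlen' : j < vis.length := by omega
    rw [← List.getD_eq_getElem vis false hjlen', hget j hj]
    have hne : (j : Int) ≠ u := by omega
    by_cases hmem : (j : Int) ∈ seen
    · simp [hmem, (PySem.Set.mem_add seen u (j : Int)).mpr (Or.inl hmem)]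
    · have : (j : Int) ∉ PySem.Set.add seen u := by
        intro hc
        rcases (PySem.Set.mem_add _ _ _).mp hc with h | h
        · exact hmem h
        · exact hne h
      simp [hmem, this]

theorem pvL2_inner (n : Nat) (v : Int) : ∀ (ns : List Int),
    (∀ u ∈ ns, 0 ≤ u ∧ u < (n : Int)) →
    ∀ (vis : List Bool) (seen : PySem.Set Int) (tailq order : List Int)
      (es : List (Int × Int)), pvR n vis seen →
      ∃ delta : List Int, ∃ es' : List (Int × Int),
        qEInner v ns (vis, tailq, es) =
          ((qEInner v ns (vis, tailq, es)).1, tailq ++ delta, es') ∧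
        pvB_inner v ns (seen, order, es) =
          ((pvB_inner v ns (seen, order, es)).1, order ++ delta, es') ∧
        pvR n (qEInner v ns (vis, tailq, es)).1 (pvB_inner v ns (seen, order, es)).1 := by
  intro ns
  induction ns with
  | nil =>
    intro _ vis seen tailq order es hR
    exact ⟨[], es, by simp [qEInner], by simp [pvB_inner], by simpa [qEInner, pvB_inner] using hR⟩
  | cons u ns ih =>
    intro hns vis seen tailq order es hR
    obtain ⟨h1, h2⟩ := hns u (by simp)
    have hns' : ∀ x ∈ ns, 0 ≤ x ∧ x < (n : Int) := fun x hx => hns x (by simp [hx])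
    have hguard := pv_guard_equiv n vis seen hR u h1 h2
    unfold qEInner pvB_inner
    rw [List.foldl_cons, List.foldl_cons]
    by_cases h : PySem.List.pyGet? vis u = some false
    · have hB := hguard.mp h
      simp only [h, if_pos, hB]
      have hR' := pvR_preserve n vis seen hR u h1 h2
      obtain ⟨delta, es', hA', hB', hRR⟩ := ih hns' (PySem.List.pySetD vis u true)
        (PySem.Set.add seen u) (tailq ++ [u]) (order ++ [u])
        (es ++ [(v, u)]) hR'
      unfold qEInner at hA'
      unfold pvB_inner at hB'
      unfold qEInner pvB_inner at hRR
      refine ⟨u :: delta, es', ?_, ?_, hRR⟩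
      · rw [hA']; simp
      · rw [hB']; simp
    · have hB : ¬ PySem.Set.contains seen u = false := fun hc =>
        h (hguard.mpr hc)
      simp only [h, if_false, hB]
      have := ih hns' vis seen tailq order es hR
      unfold qEInner pvB_inner at this
      exact this

theorem pvL2 (g : PySem.Dict Int (List Int)) (n : Nat) (hg : pvHnb g n) :
    ∀ (vis : List Bool) (q : List Int) (es : List (Int × Int)),
      ∀ (seen : PySem.Set Int) (order : List Int) (i : Nat),
      pvR n vis seen → q = order.drop i →
      qE g vis q es = pvB_bfs g seen order i es := by
  intro vis q es
  induction vis, q, es using qE.induct g with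
  | case1 vis es =>
    intro seen order i hR hq
    have hle := List.drop_eq_nil_iff.mp hq.symm
    rw [qE, pvB_bfs, dif_neg (by omega)]
  | case2 vis cur q es r ih =>
    intro seen order i hR hq
    have hi : i < order.length := by
      by_contra hi
      rw [List.drop_eq_nil_of_le (by omega)] at hq
      simp at hq
    have hd := List.drop_eq_getElem_cons hi
    rw [hd] at hq
    have hcur : order[i] = cur := by injection hq.symm
    have hdrop : order.drop (i + 1) = q := by
      have := hq
      injection this.symm with _ h
    rw [qE, pvB_bfs, dif_pos hi]
    obtain ⟨delta, es', hA, hB, hR'⟩ := pvL2_inner n cur (g.getD cur [])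
      (fun u hu => hg cur u hu) vis seen q order es hR
    have ih2 : ∀ (seen : PySem.Set Int) (order : List Int) (i : Nat),
        pvR n (qEInner cur (g.getD cur []) (vis, q, es)).1 seen →
        (qEInner cur (g.getD cur []) (vis, q, es)).2.1 = order.drop i →
        qE g (qEInner cur (g.getD cur []) (vis, q, es)).1
          (qEInner cur (g.getD cur []) (vis, q, es)).2.1
          (qEInner cur (g.getD cur []) (vis, q, es)).2.2 =
          pvB_bfs g seen order i (qEInner cur (g.getD cur []) (vis, q, es)).2.2 := ih
    have e1 : (qEInner cur (g.getD cur []) (vis, q, es)).2.1 = q ++ delta := by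
      conv_lhs => rw [hA]
    have e2 : (pvB_inner cur (g.getD cur []) (seen, order, es)).2.1 = order ++ delta := by
      conv_lhs => rw [hB]
    have e3 : (qEInner cur (g.getD cur []) (vis, q, es)).2.2 = es' := by
      conv_lhs => rw [hA]
    have e4 : (pvB_inner cur (g.getD cur []) (seen, order, es)).2.2 = es' := by
      conv_lhs => rw [hB]
    rw [hcur]
    calc qE g (qEInner cur (g.getD cur []) (vis, q, es)).1
          (qEInner cur (g.getD cur []) (vis, q, es)).2.1
          (qEInner cur (g.getD cur []) (vis, q, es)).2.2
        = pvB_bfs g (pvB_inner cur (g.getD cur []) (seen, order, es)).1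
            (order ++ delta) (i + 1) (qEInner cur (g.getD cur []) (vis, q, es)).2.2 := by
          refine ih2 _ _ _ hR' ?_
          rw [e1, List.drop_append_of_le_length (by omega), hdrop]
      _ = pvB_bfs g (pvB_inner cur (g.getD cur []) (seen, order, es)).1
            (pvB_inner cur (g.getD cur []) (seen, order, es)).2.1 (i + 1)
            (pvB_inner cur (g.getD cur []) (seen, order, es)).2.2 := by
          rw [e2, e3, e4]

-- ---- edge endpoints stay in range ----

theorem qEInner_range (n : Nat) (cur : Int) (hcur : 0 ≤ cur ∧ cur < (n : Int)) :
    ∀ (ns : List Int), (∀ u ∈ ns, 0 ≤ u ∧ u < (n : Int)) →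
    ∀ (vis : List Bool) (q : List Int) (es : List (Int × Int)),
      (∀ c ∈ q, 0 ≤ c ∧ c < (n : Int)) →
      (∀ e ∈ es, (0 ≤ e.1 ∧ e.1 < (n : Int)) ∧ (0 ≤ e.2 ∧ e.2 < (n : Int))) →
      (∀ c ∈ (qEInner cur ns (vis, q, es)).2.1, 0 ≤ c ∧ c < (n : Int)) ∧
      (∀ e ∈ (qEInner cur ns (vis, q, es)).2.2,
        (0 ≤ e.1 ∧ e.1 < (n : Int)) ∧ (0 ≤ e.2 ∧ e.2 < (n : Int))) := by
  intro ns
  induction ns with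
  | nil =>
    intro _ vis q es hq hes
    exact ⟨by simpa [qEInner] using hq, by simpa [qEInner] using hes⟩
  | cons u ns ih =>
    intro hns vis q es hq hes
    have hu := hns u (by simp)
    have hns' : ∀ x ∈ ns, 0 ≤ x ∧ x < (n : Int) := fun x hx => hns x (by simp [hx])
    unfold qEInner
    rw [List.foldl_cons]
    by_cases h : PySem.List.pyGet? vis u = some false
    · simp only [h, if_pos]
      have hq' : ∀ c ∈ q ++ [u], 0 ≤ c ∧ c < (n : Int) := by
        intro c hc
        rcases List.mem_append.mp hc with hc | hc
        · exact hq c hc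
        · simp at hc; subst hc; exact hu
      have hes' : ∀ e ∈ es ++ [(cur, u)],
          (0 ≤ e.1 ∧ e.1 < (n : Int)) ∧ (0 ≤ e.2 ∧ e.2 < (n : Int)) := by
        intro e he
        rcases List.mem_append.mp he with he | he
        · exact hes e he
        · simp at he; subst he; exact ⟨hcur, hu⟩
      have := ih hns' (PySem.List.pySetD vis u true) (q ++ [u]) (es ++ [(cur, u)]) hq' hes'
      unfold qEInner at this
      exact this
    · simp only [h, if_false]
      have := ih hns' vis q es hq hes
      unfold qEInner at this
      exact this

theorem qE_range (g : PySem.Dict Int (List Int)) (n : Nat) (hg : pvHnb g n) :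
    ∀ (vis : List Bool) (q : List Int) (es : List (Int × Int)),
      (∀ c ∈ q, 0 ≤ c ∧ c < (n : Int)) →
      (∀ e ∈ es, (0 ≤ e.1 ∧ e.1 < (n : Int)) ∧ (0 ≤ e.2 ∧ e.2 < (n : Int))) →
      ∀ e ∈ qE g vis q es,
        (0 ≤ e.1 ∧ e.1 < (n : Int)) ∧ (0 ≤ e.2 ∧ e.2 < (n : Int)) := by
  intro vis q es
  induction vis, q, es using qE.induct g with
  | case1 vis es =>
    intro _ hes e he
    rw [qE] at he
    exact hes e he
  | case2 vis cur q es r ih =>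
    intro hq hes e he
    rw [qE] at he
    have hcur := hq cur (by simp)
    have hq' : ∀ c ∈ q, 0 ≤ c ∧ c < (n : Int) := fun c hc => hq c (by simp [hc])
    have hinner := qEInner_range n cur hcur (g.getD cur [])
      (fun u hu => hg cur u hu) vis q es hq' hes
    have ih2 : (∀ c ∈ (qEInner cur (g.getD cur []) (vis, q, es)).2.1,
          0 ≤ c ∧ c < (n : Int)) →
        (∀ e ∈ (qEInner cur (g.getD cur []) (vis, q, es)).2.2,
          (0 ≤ e.1 ∧ e.1 < (n : Int)) ∧ (0 ≤ e.2 ∧ e.2 < (n : Int))) →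
        ∀ e ∈ qE g (qEInner cur (g.getD cur []) (vis, q, es)).1
          (qEInner cur (g.getD cur []) (vis, q, es)).2.1
          (qEInner cur (g.getD cur []) (vis, q, es)).2.2,
          (0 ≤ e.1 ∧ e.1 < (n : Int)) ∧ (0 ≤ e.2 ∧ e.2 < (n : Int)) := ih
    exact ih2 hinner.1 hinner.2 e he

-- ---- the two cost folds agree ----

theorem pv_sum_setD (mc : List Int) (i : Int) (a : Int)
    (h1 : 0 ≤ i) (h2 : i < (mc.length : Int)) :
    (PySem.List.pySetD mc i (PySem.List.pyGetD mc i 0 + a)).sum = mc.sum + a := by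
  have hj : i.toNat < mc.length := by omega
  rw [pv_pySetD_nonneg mc i _ h1 h2, pv_pyGetD_nonneg mc i 0 h1 h2,
    List.getD_eq_getElem mc 0 hj, List.sum_set, if_pos hj]
  have t1 := List.sum_take_add_sum_drop mc (i.toNat + 1)
  have t2 := List.sum_take_succ mc i.toNat hj
  omega

theorem pv_cost_step (K : Int) (n : Nat) (w mc : List Int) (hmc : mc.length = n)
    (e : Int × Int) (he1 : 0 ≤ e.1 ∧ e.1 < (n : Int))
    (he2 : 0 ≤ e.2 ∧ e.2 < (n : Int)) :
    pvB_cost K (w, mc.sum) e =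
        ((pvA_cost K e.1 e.2 (w, mc)).1, (pvA_cost K e.1 e.2 (w, mc)).2.sum) ∧
      (pvA_cost K e.1 e.2 (w, mc)).2.length = n := by
  have hb1 : 0 ≤ e.1 ∧ e.1 < (mc.length : Int) := by rw [hmc]; exact he1
  have hb2 : 0 ≤ e.2 ∧ e.2 < (mc.length : Int) := by rw [hmc]; exact he2
  unfold pvA_cost pvB_cost
  dsimp only
  by_cases hK : K < |PySem.List.pyGetD w e.1 0 - PySem.List.pyGetD w e.2 0|
  · rw [if_pos hK, if_pos hK]
    by_cases hcmp : PySem.List.pyGetD w e.2 0 < PySem.List.pyGetD w e.1 0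
    · rw [if_pos hcmp, if_pos hcmp]
      refine ⟨?_, by simp [PySem.List.length_pySetD, hmc]⟩
      rw [Prod.mk.injEq]
      exact ⟨rfl, by rw [pv_sum_setD mc e.2 _ hb2.1 hb2.2]⟩
    · rw [if_neg hcmp, if_neg hcmp]
      refine ⟨?_, by simp [PySem.List.length_pySetD, hmc]⟩
      rw [Prod.mk.injEq]
      exact ⟨rfl, by rw [pv_sum_setD mc e.1 _ hb1.1 hb1.2]⟩
  · rw [if_neg hK, if_neg hK]
    exact ⟨rfl, hmc⟩

theorem pv_cost_corr (K : Int) (n : Nat) :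
    ∀ (es : List (Int × Int)) (w mc : List Int), mc.length = n →
      (∀ e ∈ es, (0 ≤ e.1 ∧ e.1 < (n : Int)) ∧ (0 ≤ e.2 ∧ e.2 < (n : Int))) →
      es.foldl (pvB_cost K) (w, mc.sum) =
        ((applyA K es (w, mc)).1, (applyA K es (w, mc)).2.sum) := by
  intro es
  induction es with
  | nil => intro w mc _ _; simp [applyA]
  | cons e es ih =>
    intro w mc hmc hall
    obtain ⟨he1, he2⟩ := hall e (by simp)
    have hall' : ∀ x ∈ es,
        (0 ≤ x.1 ∧ x.1 < (n : Int)) ∧ (0 ≤ x.2 ∧ x.2 < (n : Int)) :=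
      fun x hx => hall x (by simp [hx])
    obtain ⟨hstep, hlen⟩ := pv_cost_step K n w mc hmc e he1 he2
    rw [List.foldl_cons, hstep]
    unfold applyA
    rw [List.foldl_cons]
    exact ih (pvA_cost K e.1 e.2 (w, mc)).1 (pvA_cost K e.1 e.2 (w, mc)).2 hlen hall'

-- ---- Dict.ofList items come from the input list ----

theorem pv_items_update_sub (l : List (Int × List Int)) :
    ∀ (d : PySem.Dict Int (List Int)) (p : Int × List Int),
      p ∈ (d.update l).items → p ∈ d.items ∨ p ∈ l := by
  induction l with
  | nil =>
    intro d p hp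
    exact Or.inl hp
  | cons kv l ih =>
    intro d p hp
    unfold PySem.Dict.update at hp
    rw [List.foldl_cons] at hp
    rcases ih (d.insert kv.1 kv.2) p hp with h | h
    · rcases (PySem.Dict.mem_items_insert d kv.1 kv.2 p).mp h with h2 | h2
      · right; simp [h2]
      · left; exact h2.1
    · right; simp [h]

theorem pv_hnb_of_pre (graph : List (Int × List Int)) (weights : List Int) (K : Int)
    (hpre : ∀ p ∈ graph, ∀ u ∈ p.2,
      0 ≤ u ∧ u < (weights.length : Int) ∧
      (PySem.Dict.ofList graph).contains u = true) :
    pvHnb (PySem.Dict.ofList graph) weights.length := by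
  intro v u hu
  unfold PySem.Dict.getD at hu
  cases hget : (PySem.Dict.ofList graph).get? v with
  | none => rw [hget] at hu; simp at hu
  | some ns =>
    rw [hget] at hu
    simp only [Option.getD_some] at hu
    have hitems := PySem.Dict.mem_items_of_get?_eq_some _ hget
    have hmem : (v, ns) ∈ graph := by
      rcases pv_items_update_sub graph PySem.Dict.empty (v, ns) hitems with h | h
      · simp [PySem.Dict.empty] at h
      · exact h
    have := hpre (v, ns) hmem u hu
    exact ⟨this.1, this.2.1⟩

-- ---- assembly ----

theorem pv_foldA (g : PySem.Dict Int (List Int)) (K : Int) (f : Int → List Bool) :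
    ∀ (S : List Int) (st : List Int × List Int),
      S.foldl (fun st s => pvA_bfs g K (f s) [s] st) st =
        applyA K (S.flatMap (fun s => qE g (f s) [s] [])) st := by
  intro S
  induction S with
  | nil => intro st; simp [applyA]
  | cons s S ih =>
    intro st
    rw [List.foldl_cons, List.flatMap_cons, pvA_bfs_eq, ih]
    unfold applyA
    rw [List.foldl_append]

theorem pvR_init (n : Nat) (s : Int) (h1 : 1 ≤ s) (h2 : s < (n : Int)) :
    pvR n (PySem.List.pySetD (List.replicate n false) s true) (PySem.Set.ofList [s]) := by
  have hR0 : pvR n (List.replicate n false) ([] : PySem.Set Int) := by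
    refine ⟨by simp, ?_⟩
    intro j hj
    rw [List.getD_eq_getElem _ _ (by simpa using hj)]
    simp
  exact pvR_preserve n (List.replicate n false) [] hR0 s (by omega) h2

theorem pv_foldB (g : PySem.Dict Int (List Int)) (n : Nat) (hg : pvHnb g n) :
    ∀ (S : List Int), (∀ s ∈ S, 1 ≤ s ∧ s < (n : Int)) → ∀ (es : List (Int × Int)),
      S.foldl (fun es s => pvB_bfs g (PySem.Set.ofList [s]) [s] 0 es) es =
        es ++ S.flatMap (fun s =>
          qE g (PySem.List.pySetD (List.replicate n false) s true) [s] []) := by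
  intro S
  induction S with
  | nil => intro _ es; simp
  | cons s S ih =>
    intro hS es
    obtain ⟨h1, h2⟩ := hS s (by simp)
    rw [List.foldl_cons, List.flatMap_cons]
    have hL2 := pvL2 g n hg (PySem.List.pySetD (List.replicate n false) s true) [s] es
      (PySem.Set.ofList [s]) [s] 0 (pvR_init n s h1 h2) (by simp)
    rw [← hL2, qE_append, ih (fun x hx => hS x (by simp [hx]))]
    simp

-- ===== VERDICT (by name: the statement is the Claim_ definition above) =====
theorem adjust_weights_spec : Claim_equal_adjust_weights := by
  intro graph weights K hdom hpre
  unfold Spec_adjust_weights adjust_weights adjust_weights_alt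
  show (List.foldl (fun st start => pvA_bfs (PySem.Dict.ofList graph) K
      (PySem.List.pySetD (List.replicate weights.length false) start true) [start] st)
      (weights, List.replicate weights.length 0)
      (PySem.List.pyRange 1 (weights.length : Int) 1)).2.sum =
    (List.foldl (pvB_cost K) (weights, 0)
      (List.foldl (fun es start => pvB_bfs (PySem.Dict.ofList graph)
        (PySem.Set.ofList [start]) [start] 0 es) []
        (PySem.List.pyRange 1 (weights.length : Int) 1))).2
  by_cases hn2 : 2 ≤ weights.length
  · have hn : 0 < weights.length := by omega
    have hpre' := hpre.resolve_left (by omega)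
    have hg := pv_hnb_of_pre graph weights K hpre'.2
    have hS : ∀ s ∈ PySem.List.pyRange 1 (weights.length : Int) 1,
        1 ≤ s ∧ s < (weights.length : Int) := fun s hs => PySem.List.mem_pyRange_one.mp hs
    rw [pv_foldA (PySem.Dict.ofList graph) K
      (fun s => PySem.List.pySetD (List.replicate weights.length false) s true)
      (PySem.List.pyRange 1 (weights.length : Int) 1) (weights, List.replicate weights.length 0)]
    rw [pv_foldB (PySem.Dict.ofList graph) weights.length hg
      (PySem.List.pyRange 1 (weights.length : Int) 1) hS []]
    rw [List.nil_append]
    have hrange : ∀ e ∈ (PySem.List.pyRange 1 (weights.length : Int) 1).flatMap (fun s =>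
        qE (PySem.Dict.ofList graph)
          (PySem.List.pySetD (List.replicate weights.length false) s true) [s] []),
        (0 ≤ e.1 ∧ e.1 < (weights.length : Int)) ∧
        (0 ≤ e.2 ∧ e.2 < (weights.length : Int)) := by
      intro e he
      obtain ⟨s, hs, he'⟩ := List.mem_flatMap.mp he
      obtain ⟨hs1, hs2⟩ := hS s hs
      exact qE_range (PySem.Dict.ofList graph) weights.length hg _ [s] []
        (by intro c hc; simp at hc; subst hc; constructor <;> omega)
        (by intro e he; simp at he) e he'
    have hcost := pv_cost_corr K weights.length
      ((PySem.List.pyRange 1 (weights.length : Int) 1).flatMap (fun s =>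
        qE (PySem.Dict.ofList graph)
          (PySem.List.pySetD (List.replicate weights.length false) s true) [s] []))
      weights (List.replicate weights.length 0) (by simp) hrange
    rw [show (List.replicate weights.length (0 : Int)).sum = 0 by simp] at hcost
    rw [hcost]
  · rw [PySem.List.pyRange_one_eq_nil (show (weights.length : Int) ≤ 1 by exact_mod_cast by omega)]
    simp
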